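-- pv_equiv track=rewrite | github.com/RokNikolic/advent-of-code-2023 | 2023/Puzzles/Day 14 - Parabolic Reflector Dish.py | move_stones
-- ===== SOURCE A (Python) =====
-- def move_stones(array):
--     transposed_array = list(map("".join, zip(*array)))
--     final_array = []
--     for line in transposed_array:
--         rolling_portions = line.split("#")
--         sorted_portions = ["".join(sorted(portion, reverse=True)) for portion in rolling_portions]
--         final_array.append("#".join(sorted_portions))
--
--     return final_array
-- ===== SOURCE B (Python) =====
-- def _csort_desc(seg):
--     # distribution: descending run of each distinct char, repeated by its count
--     return ''.join(ch * seg.count(ch) for ch in sorted(set(seg), reverse=True))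
--
--
-- def move_stones(array):
--     n = min(map(len, array), default=0)
--     result = []
--     for j in range(n):
--         column = ''.join(row[j] for row in array)
--         result.append('#'.join(_csort_desc(seg) for seg in column.split('#')))
--     return result
-- ===== Notes on version B (the rewrite author's own statement) =====
-- stated objective: alternative
-- what changed: Replaces zip-based transposition with direct per-column indexing and replaces the comparison sort of each '#'-free segment with a distribution sort (emit each distinct char, taken in descending order, repeated by its count).
import Mathlib
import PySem

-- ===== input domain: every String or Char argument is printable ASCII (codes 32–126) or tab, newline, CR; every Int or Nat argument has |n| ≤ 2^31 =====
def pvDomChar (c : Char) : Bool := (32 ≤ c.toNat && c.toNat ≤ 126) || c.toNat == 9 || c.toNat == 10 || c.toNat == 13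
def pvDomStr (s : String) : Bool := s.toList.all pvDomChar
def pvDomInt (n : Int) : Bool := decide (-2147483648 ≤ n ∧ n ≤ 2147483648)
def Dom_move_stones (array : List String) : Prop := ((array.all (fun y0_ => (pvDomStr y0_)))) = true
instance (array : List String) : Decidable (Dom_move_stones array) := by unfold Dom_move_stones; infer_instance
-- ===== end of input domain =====

-- B replaces zip-based transposition by direct per-column indexing and the comparison sort of each
-- '#'-free segment by a distribution sort over the segment's distinct characters (same return value).

-- ===== PORT A =====

-- zip(*array): yield the tuple of heads while every row is nonempty (Python's zip stops at the shortest)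
def pyZip (rows : List (List Char)) : List (List Char) :=
  if h : rows ≠ [] ∧ rows.all (fun r => !r.isEmpty) then
    (rows.map (fun r => r.headD ' ')) :: pyZip (rows.map List.tail)
  else []
  termination_by (rows.headD []).length
  decreasing_by
    obtain ⟨h1, h2⟩ := h
    cases rows with
    | nil => exact absurd rfl h1
    | cons a t =>
      simp only [List.map_cons, List.headD_cons]
      have ha : a ≠ [] := by
        have := h2; simp [List.all_cons] at this
        exact List.isEmpty_eq_false_iff.mp (by simpa using this.1)
      cases a with
      | nil => exact absurd rfl ha
      | cons c cs => simp

def move_stones (array : List String) : List String :=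
  -- transposed_array = list(map("".join, zip(*array))); each tuple of chars joins to the List Char itself
  let transposed_array : List (List Char) := pyZip (array.map String.toList)
  -- for line in transposed_array: split on "#", sort each portion descending, rejoin with "#"
  transposed_array.map (fun line =>
    let rolling_portions := PySem.Chars.splitOn line ['#']
    let sorted_portions : List String :=
      rolling_portions.map (fun portion => String.mk (PySem.List.sorted portion (fun x => x) true))
    PySem.Str.join "#" sorted_portions)

-- ===== PORT B =====

-- ''.join(ch * seg.count(ch) for ch in sorted(set(seg), reverse=True))
def csortDesc (seg : List Char) : List Char :=
  (PySem.List.sorted (PySem.Set.ofList seg) (fun x => x) true).flatMap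
    (fun ch => List.replicate (PySem.List.count seg ch) ch)

def move_stones_alt (array : List String) : List String :=
  -- n = min(map(len, array), default=0)
  let n : Nat := ((array.map (fun s => s.toList.length)).min?).getD 0
  (List.range n).map (fun j =>
    -- column = ''.join(row[j] for row in array); j < len(row) for every row, so the index never raises
    let column : List Char := array.map (fun row => row.toList.getD j ' ')
    PySem.Str.join "#" ((PySem.Chars.splitOn column ['#']).map (fun seg => String.mk (csortDesc seg))))

-- ===== PRECONDITION & SPEC =====
def Spec_move_stones (array : List String) (out : List String) : Prop := out = move_stones_alt array
instance (array : List String) (out : List String) : Decidable (Spec_move_stones array out) := by unfold Spec_move_stones; infer_instance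

-- ===== CLAIM (what is proved, stated in full; the proofs are below) =====
def Claim_equal_move_stones : Prop := ∀ (array : List String), Dom_move_stones array → Spec_move_stones array (move_stones array)

-- ===== LEMMAS AND PROOFS =====

theorem flatMap_replicate_pairwise (ks : List Char) (f : Char → Nat)
    (h : ks.Pairwise (fun a b => b ≤ a)) :
    (ks.flatMap (fun c => List.replicate (f c) c)).Pairwise (fun a b : Char => b ≤ a) := by
  induction ks with
  | nil => simp
  | cons c t ih =>
    rw [List.pairwise_cons] at h
    simp only [List.flatMap_cons]
    rw [List.pairwise_append]
    refine ⟨?_, ih h.2, ?_⟩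
    · exact List.pairwise_replicate.mpr (Or.inr le_rfl)
    · intro a ha b hb
      have hac : a = c := List.eq_of_mem_replicate ha
      obtain ⟨c', hc', hbc'⟩ := List.mem_flatMap.mp hb
      have hbc : b = c' := List.eq_of_mem_replicate hbc'
      subst hac; subst hbc
      exact h.1 _ hc'

theorem flatMap_replicate_perm (seg ks : List Char) (hnd : ks.Nodup)
    (hmem : ∀ c, c ∈ ks ↔ c ∈ seg) :
    (ks.flatMap (fun c => List.replicate (PySem.List.count seg c) c)).Perm seg := by
  rw [List.perm_iff_count]
  intro d
  have key : ∀ (l : List Char), l.Nodup →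
      List.count d (l.flatMap (fun c => List.replicate (PySem.List.count seg c) c)) =
        if d ∈ l then List.count d seg else 0 := by
    intro l hl
    induction l with
    | nil => simp
    | cons c t ih =>
      rw [List.nodup_cons] at hl
      simp only [List.flatMap_cons, List.count_append, List.count_replicate, ih hl.2]
      by_cases hdc : d = c
      · subst hdc
        simp [hl.1, PySem.List.count]
      · simp [hdc, Ne.symm hdc, List.mem_cons]
  rw [key ks hnd]
  by_cases hd : d ∈ ks
  · simp [hd]
  · have : d ∉ seg := fun hs => hd ((hmem d).mpr hs)
    simp [hd, List.count_eq_zero.mpr this]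

theorem sorted_rev_eq_of_perm_of_pairwise_ge (xs ys : List Char)
    (hperm : ys.Perm xs) (hpair : ys.Pairwise (fun a b => b ≤ a)) :
    PySem.List.sorted xs (fun x => x) true = ys := by
  have hs := PySem.List.sorted_perm xs (fun x => x) true
  have hsp := PySem.List.sorted_pairwise_rev xs (fun x => x)
  have hrev : (PySem.List.sorted xs (fun x => x) true).reverse = ys.reverse := by
    apply PySem.List.eq_of_perm_of_pairwise_le_of_injective (fun x => x) (fun _ _ h => h)
    · exact (List.reverse_perm _).trans ((hs.trans hperm.symm).trans (List.reverse_perm _).symm)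
    · exact List.pairwise_reverse.mpr hsp
    · exact List.pairwise_reverse.mpr hpair
  exact List.reverse_inj.mp hrev

theorem minL_zero_of_empty_mem (rows : List (List Char)) (r : List Char)
    (hr : r ∈ rows) (he : r = []) :
    (((rows.map List.length).min?).getD 0) = 0 := by
  have hne : rows.map List.length ≠ [] := by
    simp only [ne_eq, List.map_eq_nil_iff]
    rintro rfl; simp at hr
  obtain ⟨m, hm⟩ := Option.ne_none_iff_exists'.mp (fun h => hne (List.min?_eq_none_iff.mp h))
  have h0 : (0 : Nat) ∈ rows.map List.length := by
    exact List.mem_map.mpr ⟨r, hr, by simp [he]⟩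
  have := (List.min?_eq_some_iff.mp hm).2 0 h0
  simp [hm, Nat.le_zero.mp this]

theorem minL_tail (rows : List (List Char)) (h1 : rows ≠ [])
    (h2 : rows.all (fun r => !r.isEmpty) = true) :
    (((rows.map List.tail).map List.length).min?).getD 0
      = ((rows.map List.length).min?).getD 0 - 1 := by
  have hmap : (rows.map List.tail).map List.length = (rows.map List.length).map (· - 1) := by
    simp only [List.map_map]; apply List.map_congr_left; intro r _; simp
  have hne : rows.map List.length ≠ [] := by simpa using h1
  obtain ⟨m, hm⟩ := Option.ne_none_iff_exists'.mp (fun h => hne (List.min?_eq_none_iff.mp h))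
  obtain ⟨hmem, hle⟩ := List.min?_eq_some_iff.mp hm
  have hm' : ((rows.map List.length).map (· - 1)).min? = some (m - 1) := by
    apply List.min?_eq_some_iff.mpr
    constructor
    · exact List.mem_map.mpr ⟨m, hmem, rfl⟩
    · rintro b hb
      obtain ⟨b', hb', rfl⟩ := List.mem_map.mp hb
      exact Nat.sub_le_sub_right (hle b' hb') 1
  rw [hmap, hm', hm]; rfl

theorem minL_pos (rows : List (List Char)) (h1 : rows ≠ [])
    (h2 : rows.all (fun r => !r.isEmpty) = true) :
    1 ≤ ((rows.map List.length).min?).getD 0 := by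
  have hne : rows.map List.length ≠ [] := by simpa using h1
  obtain ⟨m, hm⟩ := Option.ne_none_iff_exists'.mp (fun h => hne (List.min?_eq_none_iff.mp h))
  obtain ⟨hmem, _⟩ := List.min?_eq_some_iff.mp hm
  obtain ⟨r, hr, rfl⟩ := List.mem_map.mp hmem
  have : r ≠ [] := by
    have := List.all_eq_true.mp h2 r hr
    exact List.isEmpty_eq_false_iff.mp (by simpa using this)
  rw [hm]
  exact Nat.one_le_iff_ne_zero.mpr (by simpa [List.length_eq_zero_iff] using this)

theorem pyZip_eq_columns_aux (N : Nat) : ∀ (rows : List (List Char)),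
    (rows.headD []).length ≤ N →
    pyZip rows =
      (List.range (((rows.map List.length).min?).getD 0)).map
        (fun j => rows.map (fun r => r.getD j ' ')) := by
  induction N with
  | zero =>
    intro rows hN
    rw [pyZip]
    by_cases h : rows ≠ [] ∧ rows.all (fun r => !r.isEmpty) = true
    · -- head is nonempty but has length ≤ 0: contradiction
      exfalso
      obtain ⟨h1, h2⟩ := h
      cases rows with
      | nil => exact h1 rfl
      | cons a t =>
        have ha : a ≠ [] := by
          have := List.all_eq_true.mp h2 a (List.mem_cons_self)
          exact List.isEmpty_eq_false_iff.mp (by simpa using this)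
        simp only [List.headD_cons] at hN
        exact ha (List.length_eq_zero_iff.mp (Nat.le_zero.mp hN))
    · rw [dif_neg h]
      by_cases hrows : rows = []
      · subst hrows; simp
      · have hall : ¬ (rows.all (fun r => !r.isEmpty) = true) := fun hc => h ⟨hrows, hc⟩
        obtain ⟨r, hr, hre⟩ : ∃ r ∈ rows, r = [] := by
          simp only [List.all_eq_true] at hall
          push_neg at hall
          obtain ⟨r, hr, hre⟩ := hall
          exact ⟨r, hr, by simpa [List.isEmpty_iff] using hre⟩
        rw [minL_zero_of_empty_mem rows r hr hre]
        simp
  | succ n ih =>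
    intro rows hN
    rw [pyZip]
    by_cases h : rows ≠ [] ∧ rows.all (fun r => !r.isEmpty) = true
    · obtain ⟨h1, h2⟩ := h
      rw [dif_pos ⟨h1, h2⟩]
      have hmeas : ((rows.map List.tail).headD []).length ≤ n := by
        cases rows with
        | nil => exact absurd rfl h1
        | cons a t =>
          simp only [List.map_cons, List.headD_cons] at hN ⊢
          cases a with
          | nil => simp
          | cons c cs => simp at hN ⊢; omega
      rw [ih _ hmeas, minL_tail rows h1 h2]
      have hpos := minL_pos rows h1 h2
      obtain ⟨k, hk⟩ : ∃ k, ((rows.map List.length).min?).getD 0 = k + 1 :=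
        ⟨_, (Nat.succ_pred_eq_of_pos hpos).symm⟩
      rw [hk]
      simp only [Nat.add_sub_cancel, List.range_succ_eq_map, List.map_cons, List.map_map]
      congr 1
      · apply List.map_congr_left; intro r _
        cases r <;> simp
      · apply List.map_congr_left; intro j _
        simp only [Function.comp]
        apply List.map_congr_left; intro r _
        cases r <;> simp
    · rw [dif_neg h]
      by_cases hrows : rows = []
      · subst hrows; simp
      · have hall : ¬ (rows.all (fun r => !r.isEmpty) = true) := fun hc => h ⟨hrows, hc⟩
        obtain ⟨r, hr, hre⟩ : ∃ r ∈ rows, r = [] := by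
          simp only [List.all_eq_true] at hall
          push_neg at hall
          obtain ⟨r, hr, hre⟩ := hall
          exact ⟨r, hr, by simpa [List.isEmpty_iff] using hre⟩
        rw [minL_zero_of_empty_mem rows r hr hre]
        simp

theorem csortDesc_eq_sorted (seg : List Char) :
    PySem.List.sorted seg (fun x => x) true = csortDesc seg := by
  set ks := PySem.List.sorted (PySem.Set.ofList seg) (fun x => x) true with hks
  have hnd : ks.Nodup :=
    ((PySem.List.sorted_perm _ _ _).symm).nodup (PySem.Set.nodup_ofList seg)
  have hmem : ∀ c, c ∈ ks ↔ c ∈ seg := by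
    intro c
    rw [hks, PySem.List.mem_sorted]
    exact PySem.Set.mem_ofList seg c
  unfold csortDesc
  rw [← hks]
  exact sorted_rev_eq_of_perm_of_pairwise_ge _ _ (flatMap_replicate_perm seg ks hnd hmem)
    (flatMap_replicate_pairwise ks _ (PySem.List.sorted_pairwise_rev _ _))

theorem pyZip_eq_columns (rows : List (List Char)) :
    pyZip rows =
      (List.range (((rows.map List.length).min?).getD 0)).map
        (fun j => rows.map (fun r => r.getD j ' ')) :=
  pyZip_eq_columns_aux (rows.headD []).length rows le_rfl

-- ===== VERDICT (by name: the statement is the Claim_ definition above) =====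
theorem move_stones_spec : Claim_equal_move_stones := by
  intro array _
  unfold Spec_move_stones move_stones move_stones_alt
  rw [pyZip_eq_columns]
  simp only [List.map_map]
  apply List.map_congr_left
  intro j _
  simp only [Function.comp_apply, Function.comp_def]
  apply congrArg
  apply List.map_congr_left
  intro seg _
  rw [csortDesc_eq_sorted]
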